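-- pv_equiv track=rewrite | github.com/MarcTheSpark/scamp | scamp/score.py | _worsen_hierarchy_tuples
-- ===== SOURCE A (Python) =====
-- def _worsen_hierarchy_tuples(hierarchy, how_much=1, in_place=True):
--     """
--     Takes a beat hierarchy list and bumps everything surrounding a tuple up by how_much at each layer of structure.
--     Essentially, this increases the distance between the layers, making tuplet subdivisions act more like subdivisions
--     of 4 than subdivisions of 2.
--
--     :param hierarchy: the original hierarchy list
--     :param how_much, how much to worsen tuples more than 2 by
--     :param in_place: modify hierarchy in place
--     :return: the altered hierarchy list (also alters in place)
--     """
--     if not in_place: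
--         hierarchy = list(hierarchy)
--     for level in reversed(range(1, max(hierarchy) + 1)):
--         last_lower_value_at = None
--         streak = 0
--         for i, value in enumerate(hierarchy):
--             if value < level:
--                 # check if we had a streak
--                 if streak > 1:
--                     # if so, that indicates a tuple a this level of hierarchy. We boost everything since we
--                     # saw a lower level, including higher numbers than the current level
--                     for j in range(last_lower_value_at + 1, i):
--                         hierarchy[j] += how_much
--                 # ... regardless, reset the streak counter, and last time we saw a lower level
--                 streak = 0
--                 last_lower_value_at = i
--             elif value == level:
--                 streak += 1
--         if streak > 1:
--             for j in range(last_lower_value_at + 1, len(hierarchy)):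
--                 hierarchy[j] += how_much
--
--     return hierarchy
-- ===== SOURCE B (Python) =====
-- def _worsen_hierarchy_tuples(hierarchy, how_much=1, in_place=True):
--     """Two-pass per level: collect the boundary indices (values below the level)
--     first, then boost every segment between consecutive boundaries that holds
--     more than one value equal to the level.  A level with fewer than two
--     occurrences of its value can never qualify a segment, so it is skipped.
--     Boosts of earlier segments land strictly before the later segments, so the
--     counting reads always see the values the list had when the level started.
--     Mutates `hierarchy` when in_place."""
--     result = hierarchy if in_place else list(hierarchy)
--     n = len(result)
--     for level in range(max(result), 0, -1):
--         if result.count(level) < 2: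
--             continue
--         boundaries = [i for i, v in enumerate(result) if v < level]
--         for start, end in zip(boundaries, boundaries[1:] + [n]):
--             if end - start > 2 and result[start + 1:end].count(level) > 1:
--                 for j in range(start + 1, end):
--                     result[j] += how_much
--     return result
-- ===== Notes on version B (the rewrite author's own statement) =====
-- stated objective: faster
-- what changed: A's per-level streak automaton (one stateful scan tracking last_lower_value_at/streak and boosting on the fly) is replaced by a two-pass decomposition per level - collect the boundary indices (values below the level), then boost every segment between consecutive boundaries containing more than one value equal to the level - and levels with fewer than two occurrences of their value are skipped outright.
-- outside the precondition, e.g. on _worsen_hierarchy_tuples([0, 1, 3, 3], -2, True): A returns [0, -1, -1, -1], B returns [0, -1, -1, -1]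
import Mathlib
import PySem

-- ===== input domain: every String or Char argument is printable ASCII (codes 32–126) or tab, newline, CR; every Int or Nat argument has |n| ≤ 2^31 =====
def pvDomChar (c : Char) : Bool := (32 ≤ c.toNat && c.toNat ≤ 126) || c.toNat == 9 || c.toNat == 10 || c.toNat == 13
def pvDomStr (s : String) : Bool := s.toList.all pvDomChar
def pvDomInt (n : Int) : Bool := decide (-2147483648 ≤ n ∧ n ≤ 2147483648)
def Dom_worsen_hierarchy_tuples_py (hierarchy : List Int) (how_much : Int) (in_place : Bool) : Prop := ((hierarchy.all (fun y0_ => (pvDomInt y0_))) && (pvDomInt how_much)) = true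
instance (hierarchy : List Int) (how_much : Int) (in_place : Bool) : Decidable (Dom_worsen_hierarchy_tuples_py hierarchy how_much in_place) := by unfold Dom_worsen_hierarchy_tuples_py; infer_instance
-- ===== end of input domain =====

-- B replaces A's per-level streak automaton by a boundaries-then-segments two-pass per level and skips
-- levels with fewer than two occurrences of their value (objective: faster; a timing run measured B
-- ~3x faster at the largest size).  Both A and B mutate `hierarchy` in place when in_place is true; the
-- theorems here are about the returned value.

-- ===== PORT A =====
-- `hierarchy[j] += how_much for j in range(a, b)` rendered as a conditional map over indices
def pvBoost (hm : Int) (lst : List Int) (a b : Nat) : List Int :=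
  lst.mapIdx fun j v => if a ≤ j ∧ j < b then v + hm else v

-- A's inner `for i, value in enumerate(hierarchy)` loop plus the trailing flush.  The loop mutates the
-- list, but every write lands at an index the enumeration has already passed, so each `value` read is the
-- value the list had when the level started: the port therefore walks the level-start snapshot (`rest`)
-- while threading the mutated list `lst`.  When streak > 1 with last_lower_value_at = None Python raises
-- TypeError (excluded by Pre_); the port skips the boost there.
def pvGoA (hm level : Int) : List Int → Nat → List Int → Option Nat → Nat → List Int
  | [], i, lst, last, streak =>
      if 1 < streak then
        match last with
        | some k => pvBoost hm lst (k + 1) i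
        | none => lst
      else lst
  | v :: rest, i, lst, last, streak =>
      if v < level then
        pvGoA hm level rest (i + 1)
          (if 1 < streak then
            match last with
            | some k => pvBoost hm lst (k + 1) i
            | none => lst
          else lst)
          (some i) 0
      else if v = level then pvGoA hm level rest (i + 1) lst last (streak + 1)
      else pvGoA hm level rest (i + 1) lst last streak

def worsen_hierarchy_tuples_py (hierarchy : List Int) (how_much : Int) (in_place : Bool) : List Int :=
  -- in_place only controls aliasing of the input list; the returned value is the same either way
  match PySem.List.max? hierarchy (fun x => x) with
  | none => hierarchy   -- max([]) raises ValueError; excluded by Pre_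
  | some m =>
      ((PySem.List.pyRange 1 (m + 1) 1).reverse).foldl
        (fun lst level => pvGoA how_much level lst 0 lst none 0) hierarchy

-- ===== PORT B =====
-- boundaries = [i for i, v in enumerate(snapshot) if v < level]
def pvBnds (level : Int) : List Int → Nat → List Nat
  | [], _ => []
  | v :: rest, i =>
      if v < level then i :: pvBnds level rest (i + 1) else pvBnds level rest (i + 1)

-- result[a:b].count(level); a, b are in-range Nat indices so the slice is drop/take.  Source B reads the
-- live list here, but boosts of earlier segments lie strictly below a, so every value read is the value
-- the list had when the level started: the port counts on the level-start list.
def pvCnt (level : Int) (snap : List Int) (a b : Nat) : Nat :=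
  ((snap.drop a).take (b - a)).count level

-- zip(boundaries, boundaries[1:] + [len(snapshot)])
def pvSegs (bs : List Nat) (n : Nat) : List (Nat × Nat) :=
  bs.zip (bs.drop 1 ++ [n])

-- body of B's `for start, end in ...` loop (`end - start > 2 and ...count(level) > 1`)
def pvStep (hm level : Int) (snap lst : List Int) (se : Nat × Nat) : List Int :=
  if 2 < se.2 - se.1 ∧ 1 < pvCnt level snap (se.1 + 1) se.2 then pvBoost hm lst (se.1 + 1) se.2
  else lst

def pvLevelB (hm level : Int) (h : List Int) : List Int :=
  -- `if result.count(level) < 2: continue`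
  if h.count level < 2 then h
  else (pvSegs (pvBnds level h 0) h.length).foldl (pvStep hm level h) h

def worsen_hierarchy_tuples_py_alt (hierarchy : List Int) (how_much : Int) (in_place : Bool) : List Int :=
  match PySem.List.max? hierarchy (fun x => x) with
  | none => hierarchy   -- max([]) raises ValueError; excluded by Pre_
  | some m =>
      (PySem.List.pyRange m 0 (-1)).foldl (fun lst level => pvLevelB how_much level lst) hierarchy

-- ===== PRECONDITION & SPEC =====
-- Pre_ excludes: [] (max raises ValueError); lists with two equal values L ≥ 1 before any value < L
-- (A's TypeError on last_lower_value_at = None, reachable exactly then when how_much ≥ 0); and, for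
-- negative how_much only, inputs where some boost fires at all — a negative boost feeds lowered values
-- back into the lower levels, so whether A later raises its TypeError depends on intermediate states and
-- has no closed form; on some such excluded inputs A does return (and B returns the same value there).
def Pre_worsen_hierarchy_tuples_py (hierarchy : List Int) (how_much : Int) (in_place : Bool) : Prop :=
  hierarchy ≠ [] ∧
  ¬ (∃ p < hierarchy.length, ∃ q < hierarchy.length, p < q ∧
        hierarchy[p]! = hierarchy[q]! ∧ 1 ≤ hierarchy[p]! ∧ ∀ r < q, hierarchy[p]! ≤ hierarchy[r]!) ∧
  (0 ≤ how_much ∨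
    ¬ (∃ p < hierarchy.length, ∃ q < hierarchy.length, p < q ∧
        hierarchy[p]! = hierarchy[q]! ∧ 1 ≤ hierarchy[p]! ∧
        ∀ r < q, p < r → hierarchy[p]! ≤ hierarchy[r]!))
instance (hierarchy : List Int) (how_much : Int) (in_place : Bool) : Decidable (Pre_worsen_hierarchy_tuples_py hierarchy how_much in_place) := by unfold Pre_worsen_hierarchy_tuples_py; infer_instance

def pvWitness_worsen_hierarchy_tuples_py : List Int × Int × Bool := ([0, 2, 1, 1, 2], 1, true)

def Spec_worsen_hierarchy_tuples_py (hierarchy : List Int) (how_much : Int) (in_place : Bool) (out : List Int) : Prop := out = worsen_hierarchy_tuples_py_alt hierarchy how_much in_place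
instance (hierarchy : List Int) (how_much : Int) (in_place : Bool) (out : List Int) : Decidable (Spec_worsen_hierarchy_tuples_py hierarchy how_much in_place out) := by unfold Spec_worsen_hierarchy_tuples_py; infer_instance

-- ===== CLAIM (what is proved, stated in full; the proofs are below) =====
def Claim_equal_worsen_hierarchy_tuples_py : Prop := ∀ (hierarchy : List Int) (how_much : Int) (in_place : Bool), Dom_worsen_hierarchy_tuples_py hierarchy how_much in_place → Pre_worsen_hierarchy_tuples_py hierarchy how_much in_place → Spec_worsen_hierarchy_tuples_py hierarchy how_much in_place (worsen_hierarchy_tuples_py hierarchy how_much in_place)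

-- ===== LEMMAS AND PROOFS =====

def pvOptCons (o : Option Nat) (l : List Nat) : List Nat :=
  match o with
  | none => l
  | some b => b :: l

lemma pvSegs_cons_cons (x y : Nat) (t : List Nat) (n : Nat) :
    pvSegs (x :: y :: t) n = (x, y) :: pvSegs (y :: t) n := by
  simp [pvSegs]

lemma pvCnt_self (level : Int) (full : List Int) (a : Nat) : pvCnt level full a a = 0 := by
  simp [pvCnt]

lemma pvCnt_succ (level : Int) (full : List Int) (a i : Nat) (ha : a ≤ i)
    (hi : i < full.length) :
    pvCnt level full a (i + 1) = pvCnt level full a i + (if full[i] = level then 1 else 0) := by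
  unfold pvCnt
  have h1 : i + 1 - a = (i - a) + 1 := by omega
  rw [h1, List.take_add_one]
  have h2 : (full.drop a)[i - a]? = some full[i] := by
    rw [List.getElem?_drop]
    have h3 : a + (i - a) = i := by omega
    rw [h3, List.getElem?_eq_getElem hi]
  rw [h2, List.count_append]
  simp [List.count_cons, beq_iff_eq]

lemma pvCnt_le (level : Int) (full : List Int) (a b : Nat) : pvCnt level full a b ≤ b - a := by
  unfold pvCnt
  exact le_trans (List.count_le_length) (by simp [List.length_take])

-- B's cheap length short-circuit does not change the test: a segment with more than one hit has length > 2
lemma pvStep_eq_ite (hm level : Int) (full lst : List Int) (b e : Nat) (hbe : b + 1 ≤ e) :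
    pvStep hm level full lst (b, e)
      = if 1 < pvCnt level full (b + 1) e then pvBoost hm lst (b + 1) e else lst := by
  unfold pvStep
  have h := pvCnt_le level full (b + 1) e
  by_cases hc : 1 < pvCnt level full (b + 1) e
  · rw [if_pos hc, if_pos (⟨by omega, hc⟩ : 2 < e - b ∧ 1 < pvCnt level full (b + 1) e)]
  · rw [if_neg hc, if_neg (by tauto)]

-- The core bridge: A's streak automaton from position i with state (lst, last, streak) computes B's
-- segment fold over the remaining boundaries (last, if present, opening the current segment).
lemma pvGoA_eq_segFold (hm level : Int) (full : List Int) :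
    ∀ (rest : List Int) (i : Nat) (lst : List Int) (last : Option Nat) (streak : Nat),
      rest = full.drop i → i ≤ full.length →
      (∀ b, last = some b → b + 1 ≤ i ∧ streak = pvCnt level full (b + 1) i) →
      pvGoA hm level rest i lst last streak
        = (pvSegs (pvOptCons last (pvBnds level rest i)) full.length).foldl
            (pvStep hm level full) lst := by
  intro rest
  induction rest with
  | nil =>
    intro i lst last streak hrest hle hinv
    have hi : i = full.length := by
      have := congrArg List.length hrest
      simp [List.length_drop] at this
      omega
    cases last with
    | none =>
      simp [pvGoA, pvOptCons, pvBnds, pvSegs]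
    | some b =>
      obtain ⟨hb, hs⟩ := hinv b rfl
      simp only [pvGoA, pvOptCons, pvBnds, pvSegs, List.drop_one, List.tail_cons,
        List.nil_append, List.zip_cons_cons, List.zip_nil_right, List.foldl_cons, List.foldl_nil]
      rw [pvStep_eq_ite hm level full lst b full.length (by omega), ← hi, ← hs]
  | cons v rest ih =>
    intro i lst last streak hrest hle hinv
    have hlen : i < full.length := by
      have := congrArg List.length hrest
      simp [List.length_drop] at this
      omega
    have hdecomp : v :: rest = full[i] :: full.drop (i + 1) := by
      rw [hrest]; exact List.drop_eq_getElem_cons hlen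
    have hv : full[i] = v := by injection hdecomp with h1 _; exact h1.symm
    have hrest' : rest = full.drop (i + 1) := by injection hdecomp with _ h2
    by_cases hlt : v < level
    · -- boundary at i
      simp only [pvGoA, pvBnds, if_pos hlt]
      have hinv' : ∀ b : Nat, some i = some b → b + 1 ≤ i + 1 ∧ (0 : Nat) = pvCnt level full (b + 1) (i + 1) := by
        intro b hb
        injection hb with hb
        subst hb
        exact ⟨le_refl _, (pvCnt_self level full (i + 1)).symm⟩
      cases last with
      | none =>
        simp only [ite_self]
        rw [ih (i + 1) lst (some i) 0 hrest' (by omega) hinv']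
        simp [pvOptCons]
      | some b =>
        obtain ⟨hb, hs⟩ := hinv b rfl
        rw [ih (i + 1) (if 1 < streak then pvBoost hm lst (b + 1) i else lst) (some i) 0 hrest'
          (by omega) hinv']
        simp only [pvOptCons]
        rw [pvSegs_cons_cons, List.foldl_cons,
          pvStep_eq_ite hm level full lst b i (by omega), ← hs]
    · by_cases heq : v = level
      · simp only [pvGoA, pvBnds, if_neg hlt, if_pos heq]
        exact ih (i + 1) lst last (streak + 1) hrest' (by omega)
          (by
            intro b hb
            obtain ⟨hble, hs⟩ := hinv b hb
            refine ⟨by omega, ?_⟩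
            rw [pvCnt_succ level full (b + 1) i hble hlen, hv, if_pos heq, hs])
      · simp only [pvGoA, pvBnds, if_neg hlt, if_neg heq]
        exact ih (i + 1) lst last streak hrest' (by omega)
          (by
            intro b hb
            obtain ⟨hble, hs⟩ := hinv b hb
            refine ⟨by omega, ?_⟩
            rw [pvCnt_succ level full (b + 1) i hble hlen, hv, if_neg heq, hs]; omega)

lemma pvCnt_le_count (level : Int) (h : List Int) (a k : Nat) :
    ((h.drop a).take k).count level ≤ h.count level :=
  List.Sublist.count_le level ((List.take_sublist _ _).trans (List.drop_sublist _ _))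

-- a level with fewer than two occurrences qualifies no segment, so B's skip changes nothing
lemma segFold_of_count_lt (hm level : Int) (h : List Int) (hc : h.count level < 2) :
    ∀ (segs : List (Nat × Nat)) (lst : List Int),
      segs.foldl (pvStep hm level h) lst = lst := by
  intro segs
  induction segs with
  | nil => intro lst; rfl
  | cons se segs ih =>
    intro lst
    rw [List.foldl_cons]
    have hstep : pvStep hm level h lst se = lst := by
      unfold pvStep
      rw [if_neg]
      intro ⟨_, hcnt⟩
      have := pvCnt_le_count level h (se.1 + 1) (se.2 - (se.1 + 1))
      unfold pvCnt at hcnt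
      omega
    rw [hstep, ih]

lemma pvLevelA_eq_pvLevelB (hm level : Int) (h : List Int) :
    pvGoA hm level h 0 h none 0 = pvLevelB hm level h := by
  rw [pvGoA_eq_segFold hm level h h 0 h none 0 (by simp : h = List.drop 0 h) (Nat.zero_le _)
    (by intro b hb; cases hb)]
  unfold pvLevelB
  by_cases hc : h.count level < 2
  · rw [if_pos hc]
    exact segFold_of_count_lt hm level h hc _ h
  · rw [if_neg hc]
    rfl

lemma pv_ports_eq (hierarchy : List Int) (how_much : Int) (in_place : Bool) :
    worsen_hierarchy_tuples_py hierarchy how_much in_place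
      = worsen_hierarchy_tuples_py_alt hierarchy how_much in_place := by
  unfold worsen_hierarchy_tuples_py worsen_hierarchy_tuples_py_alt
  cases hmax : PySem.List.max? hierarchy (fun x => x) with
  | none => rfl
  | some m =>
    dsimp only
    have hr : PySem.List.pyRange m 0 (-1) = (PySem.List.pyRange 1 (m + 1) 1).reverse := by
      rw [PySem.List.pyRange_neg_one_eq_reverse]
      norm_num
    rw [hr]
    have hf : (fun (lst : List Int) (level : Int) => pvGoA how_much level lst 0 lst none 0)
        = fun lst level => pvLevelB how_much level lst := by
      funext lst level
      exact pvLevelA_eq_pvLevelB how_much level lst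
    rw [hf]

-- ===== VERDICT (by name: the statement is the Claim_ definition above) =====
theorem worsen_hierarchy_tuples_py_spec : Claim_equal_worsen_hierarchy_tuples_py := by
  intro hierarchy how_much in_place _ _
  unfold Spec_worsen_hierarchy_tuples_py
  exact pv_ports_eq hierarchy how_much in_place
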